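-- pv_equiv track=rewrite | github.com/aakaluza/AleksAdventOfCode | 2025/Day4/SolutionPart2.py | calculateAdjacencies
-- ===== SOURCE A (Python) =====
-- def calculateAdjacencies(warehouse: list[list[int]]) -> int:
--     result = 0
--     updatedResult = 0
--
--     while(True):
--         removedIndices = []
--
--         for i in range(1, len(warehouse) - 1, 1):
--             for j in range(1, len(warehouse[i]) - 1, 1):
--                 if warehouse[i][j] == 1:
--                     sum = warehouse[i-1][j-1] + warehouse[i-1][j] + warehouse[i-1][j+1] + warehouse[i][j-1] + warehouse[i][j+1] + warehouse[i+1][j-1] + warehouse[i+1][j] + warehouse[i+1][j+1]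
--                     if (sum < 4):
--                         updatedResult += 1
--                         removedIndices.append((i, j))
--
--         if updatedResult == 0 or len(removedIndices) == 0:
--             return result
--         else:
--             result += updatedResult
--             updatedResult = 0
--
--             for pair in removedIndices:
--                 warehouse[pair[0]][pair[1]] = 0
-- ===== SOURCE B (Python) =====
-- def calculateAdjacencies(warehouse):
--     # Frontier-based peeling: after the first full scan, only neighbours of
--     # just-removed cells can become removable, so each later round examines
--     # only that frontier instead of rescanning the whole grid.
--     # Note: like A, this mutates `warehouse` (removed cells are set to 0).
--     total = 0
--     cand = {(i, j)
--             for i in range(1, len(warehouse) - 1)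
--             for j in range(1, len(warehouse[i]) - 1)}
--     while cand:
--         removed = [(i, j) for (i, j) in cand
--                    if warehouse[i][j] == 1
--                    and sum(warehouse[i + di][j + dj]
--                            for di in (-1, 0, 1) for dj in (-1, 0, 1)
--                            if (di, dj) != (0, 0)) < 4]
--         if not removed:
--             break
--         total += len(removed)
--         for (i, j) in removed:
--             warehouse[i][j] = 0
--         cand = {(i + di, j + dj)
--                 for (i, j) in removed
--                 for di in (-1, 0, 1) for dj in (-1, 0, 1)
--                 if (di, dj) != (0, 0)}
--         cand = {(i, j) for (i, j) in cand
--                 if 1 <= i < len(warehouse) - 1 and 1 <= j < len(warehouse[i]) - 1}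
--     return total
-- ===== Notes on version B (the rewrite author's own statement) =====
-- stated objective: alternative
-- what changed: Instead of rescanning every interior cell each round, B keeps a frontier set: after the first full scan, each round only examines cells adjacent to the previous round's removals (a cell's support can only drop when a neighbour is removed); on the measured inputs this is not faster in wall-clock terms.
import Mathlib
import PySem

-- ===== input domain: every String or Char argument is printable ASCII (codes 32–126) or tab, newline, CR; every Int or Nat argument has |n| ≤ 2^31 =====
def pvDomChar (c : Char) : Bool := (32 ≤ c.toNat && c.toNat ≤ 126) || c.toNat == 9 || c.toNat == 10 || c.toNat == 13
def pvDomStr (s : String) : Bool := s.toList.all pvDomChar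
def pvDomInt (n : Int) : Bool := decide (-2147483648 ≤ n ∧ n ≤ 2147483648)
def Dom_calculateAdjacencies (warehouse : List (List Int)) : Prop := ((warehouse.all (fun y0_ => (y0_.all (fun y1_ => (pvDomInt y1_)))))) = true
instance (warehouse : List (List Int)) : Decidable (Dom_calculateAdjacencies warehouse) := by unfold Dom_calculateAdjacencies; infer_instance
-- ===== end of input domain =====

-- B replaces A's repeated full-grid rescans by frontier-based peeling (each round only
-- examines neighbours of the previous round's removals); equivalence is about the return
-- value (both Pythons mutate `warehouse` by zeroing exactly the same cells).

-- ===== PORT A =====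
-- Python 'warehouse[i][j]': indices are in range on every access A performs under
-- Pre_calculateAdjacencies; out of range (where Python raises, excluded by Pre_) we return 0.
def pvG (w : List (List Int)) (i j : Nat) : Int := (w.getD i []).getD j 0

def pvSumA (w : List (List Int)) (i j : Nat) : Int :=
  pvG w (i-1) (j-1) + pvG w (i-1) j + pvG w (i-1) (j+1) + pvG w i (j-1) + pvG w i (j+1) +
    pvG w (i+1) (j-1) + pvG w (i+1) j + pvG w (i+1) (j+1)

-- one pass of A's nested scan: (updatedResult, removedIndices)
def pvRoundA (w : List (List Int)) : Int × List (Nat × Nat) :=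
  (List.range' 1 (w.length - 2)).foldl (fun st i =>
    (List.range' 1 ((w.getD i []).length - 2)).foldl (fun st j =>
      if pvG w i j = 1 ∧ pvSumA w i j < 4 then (st.1 + 1, st.2 ++ [(i, j)]) else st) st)
    ((0 : Int), ([] : List (Nat × Nat)))

-- 'for pair in removedIndices: warehouse[pair[0]][pair[1]] = 0'
def pvApply (w : List (List Int)) (rs : List (Nat × Nat)) : List (List Int) :=
  rs.foldl (fun g p => g.set p.1 ((g.getD p.1 []).set p.2 0)) w

-- 'while(True)'; the fuel (#cells + 1) is only a totality guard: every continuing round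
-- zeroes at least one distinct 1-cell, so fewer than #cells + 1 rounds ever run.
def pvLoopA : Nat → List (List Int) → Int → Int
  | 0, _, res => res
  | fuel+1, w, res =>
      let st := pvRoundA w
      if st.1 = 0 ∨ st.2.length = 0 then res
      else pvLoopA fuel (pvApply w st.2) (res + st.1)

def pvFuel (w : List (List Int)) : Nat := w.foldl (fun a r => a + r.length) 0 + 1

def calculateAdjacencies (warehouse : List (List Int)) : Int :=
  pvLoopA (pvFuel warehouse) warehouse 0

-- ===== PORT B =====
-- the 8 neighbour coordinates (i±1, j±1); only applied to interior cells (i, j ≥ 1)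
def pvNbrs (p : Nat × Nat) : List (Nat × Nat) :=
  [(p.1-1, p.2-1), (p.1-1, p.2), (p.1-1, p.2+1), (p.1, p.2-1),
   (p.1, p.2+1), (p.1+1, p.2-1), (p.1+1, p.2), (p.1+1, p.2+1)]

-- 'sum(warehouse[i+di][j+dj] for ...)'
def pvSumB (w : List (List Int)) (p : Nat × Nat) : Int :=
  (pvNbrs p).foldl (fun s q => s + pvG w q.1 q.2) 0

def pvInterior (w : List (List Int)) (p : Nat × Nat) : Bool :=
  decide (1 ≤ p.1 ∧ p.1 + 1 < w.length ∧ 1 ≤ p.2 ∧ p.2 + 1 < (w.getD p.1 []).length)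

-- the initial candidate comprehension, before dedup into a set
def pvCandList (w : List (List Int)) : List (Nat × Nat) :=
  (List.range' 1 (w.length - 2)).flatMap (fun i =>
    (List.range' 1 ((w.getD i []).length - 2)).map (fun j => (i, j)))

-- 'while cand: …'; same totality-guard fuel as port A (the loops run in lockstep)
def pvLoopB : Nat → List (List Int) → List (Nat × Nat) → Int → Int
  | 0, _, _, total => total
  | fuel+1, w, cand, total =>
      if cand.isEmpty then total
      else
        let removed := cand.filter (fun p => pvG w p.1 p.2 == 1 && decide (pvSumB w p < 4))
        if removed.isEmpty then total
        else
          let w' := pvApply w removed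
          pvLoopB fuel w'
            (PySem.Set.ofList ((removed.flatMap pvNbrs).filter (fun p => pvInterior w' p)))
            (total + removed.length)

def calculateAdjacencies_alt (warehouse : List (List Int)) : Int :=
  pvLoopB (pvFuel warehouse) warehouse (PySem.Set.ofList (pvCandList warehouse)) 0

-- ===== PRECONDITION & SPEC =====
-- Pre_ excludes exactly the inputs on which A raises IndexError: a ragged grid with an
-- interior 1-cell whose row above or below is too short for the eight neighbour accesses.
def Pre_calculateAdjacencies (warehouse : List (List Int)) : Prop :=
  ∀ i < warehouse.length, ∀ j < (warehouse.getD i []).length,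
    1 ≤ i → i + 1 < warehouse.length → 1 ≤ j → j + 1 < (warehouse.getD i []).length →
    (warehouse.getD i []).getD j 0 = 1 →
    j + 2 ≤ (warehouse.getD (i-1) []).length ∧ j + 2 ≤ (warehouse.getD (i+1) []).length

instance (warehouse : List (List Int)) : Decidable (Pre_calculateAdjacencies warehouse) := by
  unfold Pre_calculateAdjacencies
  exact @Nat.decidableBallLT _ _ (fun i hi => @Nat.decidableBallLT _ _ (fun j hj => inferInstance))

def pvWitness_calculateAdjacencies : List (List Int) := [[0, 0, 0], [0, 1, 0], [0, 0, 0]]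

def Spec_calculateAdjacencies (warehouse : List (List Int)) (out : Int) : Prop := out = calculateAdjacencies_alt warehouse
instance (warehouse : List (List Int)) (out : Int) : Decidable (Spec_calculateAdjacencies warehouse out) := by unfold Spec_calculateAdjacencies; infer_instance

-- ===== CLAIM (what is proved, stated in full; the proofs are below) =====
def Claim_equal_calculateAdjacencies : Prop := ∀ (warehouse : List (List Int)), Dom_calculateAdjacencies warehouse → Pre_calculateAdjacencies warehouse → Spec_calculateAdjacencies warehouse (calculateAdjacencies warehouse)

-- ===== LEMMAS AND PROOFS =====

-- interior cell of the grid (the coordinates A's nested loops scan)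
def pvInt' (w : List (List Int)) (p : Nat × Nat) : Prop :=
  1 ≤ p.1 ∧ p.1 + 1 < w.length ∧ 1 ≤ p.2 ∧ p.2 + 1 < (w.getD p.1 []).length

-- a cell A would remove in the current round
def pvRem (w : List (List Int)) (p : Nat × Nat) : Prop :=
  pvInt' w p ∧ pvG w p.1 p.2 = 1 ∧ pvSumA w p.1 p.2 < 4

-- the two grid states agree in everything the algorithm observes
def pvExt (a b : List (List Int)) : Prop :=
  a.length = b.length ∧ (∀ i, ((a.getD i []).length = (b.getD i []).length)) ∧
    ∀ i j, pvG a i j = pvG b i j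

theorem pvG_set1 (w : List (List Int)) (p : Nat × Nat) (i j : Nat) :
    pvG (w.set p.1 ((w.getD p.1 []).set p.2 0)) i j =
      if (i, j) = p then 0 else pvG w i j := by
  obtain ⟨a, b⟩ := p
  unfold pvG
  simp only [List.getD_eq_getElem?_getD, List.getElem?_set, Prod.mk.injEq]
  by_cases hi : a = i
  · subst hi
    by_cases hl : a < w.length
    · simp only [if_pos rfl, if_pos hl, Option.getD_some, List.getElem?_set]
      by_cases hj : b = j
      · subst hj
        by_cases hb : b < (w[a]?.getD []).length <;> simp [List.getElem?_set, hb]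
      · simp [hj, Ne.symm hj]
    · have hnone : w[a]? = none := by rw [List.getElem?_eq_none_iff]; omega
      simp [hl, hnone]
  · simp [hi, Ne.symm hi]

theorem pvApply_cons (w : List (List Int)) (r : Nat × Nat) (rs : List (Nat × Nat)) :
    pvApply w (r :: rs) = pvApply (w.set r.1 ((w.getD r.1 []).set r.2 0)) rs := rfl

theorem pvG_apply (rs : List (Nat × Nat)) (w : List (List Int)) (i j : Nat) :
    pvG (pvApply w rs) i j = if (i, j) ∈ rs then 0 else pvG w i j := by
  induction rs generalizing w with
  | nil => simp [pvApply]
  | cons r rs ih =>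
    rw [pvApply_cons, ih, pvG_set1]
    by_cases h1 : ((i, j) : Nat × Nat) ∈ rs <;> by_cases h2 : ((i, j) : Nat × Nat) = r <;>
      simp [h1, h2]

theorem len_apply (rs : List (Nat × Nat)) (w : List (List Int)) :
    (pvApply w rs).length = w.length := by
  induction rs generalizing w with
  | nil => rfl
  | cons r rs ih => rw [pvApply_cons, ih, List.length_set]

theorem rowlen_set1 (w : List (List Int)) (p : Nat × Nat) (i : Nat) :
    ((w.set p.1 ((w.getD p.1 []).set p.2 0)).getD i []).length = (w.getD i []).length := by
  simp only [List.getD_eq_getElem?_getD, List.getElem?_set]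
  by_cases hi : p.1 = i
  · subst hi
    by_cases hl : p.1 < w.length
    · simp [hl]
    · have hnone : w[p.1]? = none := by rw [List.getElem?_eq_none_iff]; omega
      simp [hl, hnone]
  · simp [hi]

theorem rowlen_apply (rs : List (Nat × Nat)) (w : List (List Int)) (i : Nat) :
    ((pvApply w rs).getD i []).length = (w.getD i []).length := by
  induction rs generalizing w with
  | nil => rfl
  | cons r rs ih => rw [pvApply_cons, ih, rowlen_set1]

theorem inner_char (w : List (List Int)) (i : Nat) (js : List Nat) (st : Int × List (Nat × Nat)) :
    js.foldl (fun st j => if pvG w i j = 1 ∧ pvSumA w i j < 4 then (st.1 + 1, st.2 ++ [(i, j)]) else st) st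
      = (st.1 + (((js.filter (fun j => decide (pvG w i j = 1 ∧ pvSumA w i j < 4))).length : Int)),
         st.2 ++ (js.filter (fun j => decide (pvG w i j = 1 ∧ pvSumA w i j < 4))).map (fun j => (i, j))) := by
  induction js generalizing st with
  | nil => simp
  | cons a t ih =>
    simp only [List.foldl_cons, List.filter_cons]
    by_cases h : pvG w i a = 1 ∧ pvSumA w i a < 4
    · have hd : decide (pvG w i a = 1 ∧ pvSumA w i a < 4) = true := decide_eq_true h
      rw [if_pos h, ih, hd]
      simp only [if_true, List.length_cons, List.map_cons]
      refine Prod.ext ?_ ?_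
      · show st.1 + 1 + _ = st.1 + _
        push_cast
        ring
      · show (st.2 ++ [(i, a)]) ++ _ = st.2 ++ ((i, a) :: _)
        simp
    · have hd : decide (pvG w i a = 1 ∧ pvSumA w i a < 4) = false := decide_eq_false h
      rw [if_neg h, ih, hd]
      simp

theorem outer_char (w : List (List Int)) (is : List Nat) (st : Int × List (Nat × Nat)) :
    is.foldl (fun st i =>
        (List.range' 1 ((w.getD i []).length - 2)).foldl (fun st j =>
          if pvG w i j = 1 ∧ pvSumA w i j < 4 then (st.1 + 1, st.2 ++ [(i, j)]) else st) st) st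
      = (st.1 + ((is.flatMap (fun i => ((List.range' 1 ((w.getD i []).length - 2)).filter
            (fun j => decide (pvG w i j = 1 ∧ pvSumA w i j < 4))).map (fun j => (i, j)))).length : Int),
         st.2 ++ is.flatMap (fun i => ((List.range' 1 ((w.getD i []).length - 2)).filter
            (fun j => decide (pvG w i j = 1 ∧ pvSumA w i j < 4))).map (fun j => (i, j)))) := by
  induction is generalizing st with
  | nil => simp
  | cons a t ih =>
    simp only [List.foldl_cons, List.flatMap_cons]
    rw [inner_char, ih]
    refine Prod.ext ?_ ?_
    · show st.1 + _ + _ = st.1 + _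
      simp only [List.length_append, List.length_map]
      push_cast; ring
    · show (st.2 ++ _) ++ _ = st.2 ++ (_ ++ _)
      simp

theorem roundA_snd (w : List (List Int)) :
    (pvRoundA w).2 = (pvCandList w).filter
      (fun p => decide (pvG w p.1 p.2 = 1 ∧ pvSumA w p.1 p.2 < 4)) := by
  unfold pvRoundA pvCandList
  rw [outer_char]
  rw [List.filter_flatMap]
  simp [List.filter_map, Function.comp_def]

theorem roundA_fst (w : List (List Int)) :
    (pvRoundA w).1 = (((pvRoundA w).2.length : Nat) : Int) := by
  unfold pvRoundA
  rw [outer_char]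
  simp

theorem mem_candList (w : List (List Int)) (p : Nat × Nat) :
    p ∈ pvCandList w ↔ pvInt' w p := by
  unfold pvCandList pvInt'
  simp only [List.mem_flatMap, List.mem_map, List.mem_range'_1]
  constructor
  · rintro ⟨i, ⟨hi1, hi2⟩, j, ⟨hj1, hj2⟩, rfl⟩
    refine ⟨hi1, ?_, hj1, ?_⟩
    · show i + 1 < w.length
      omega
    · show j + 1 < (w.getD i []).length
      omega
  · rintro ⟨h1, h2, h3, h4⟩
    exact ⟨p.1, ⟨h1, by omega⟩, p.2, ⟨h3, by omega⟩, rfl⟩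

theorem nodup_flatpairs (f : Nat → List (Nat × Nat)) (l : List Nat) (hl : l.Nodup)
    (hf : ∀ i ∈ l, (f i).Nodup) (hfst : ∀ i ∈ l, ∀ p ∈ f i, p.1 = i) :
    (l.flatMap f).Nodup := by
  induction l with
  | nil => simp
  | cons a t ih =>
    simp only [List.flatMap_cons]
    refine List.Nodup.append (hf a (by simp)) ?_ ?_
    · exact ih (List.nodup_cons.1 hl).2 (fun i hi => hf i (by simp [hi]))
        (fun i hi => hfst i (by simp [hi]))
    · intro p hpa hpt
      obtain ⟨b, hb, hpb⟩ := List.mem_flatMap.1 hpt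
      have h1 : p.1 = a := hfst a (by simp) p hpa
      have h2 : p.1 = b := hfst b (by simp [hb]) p hpb
      exact (List.nodup_cons.1 hl).1 (h1 ▸ h2 ▸ hb)

theorem nodup_candList (w : List (List Int)) : (pvCandList w).Nodup := by
  unfold pvCandList
  refine nodup_flatpairs _ _ (List.nodup_range') ?_ ?_
  · intro i _
    exact (List.nodup_range').map (fun a b h => by simpa using (Prod.mk.injEq .. ▸ h).2)
  · intro i _ p hp
    obtain ⟨j, _, rfl⟩ := List.mem_map.1 hp
    rfl

theorem mem_roundA (w : List (List Int)) (p : Nat × Nat) :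
    p ∈ (pvRoundA w).2 ↔ pvRem w p := by
  rw [roundA_snd, List.mem_filter, mem_candList]
  unfold pvRem
  simp [and_assoc]

theorem nodup_roundA (w : List (List Int)) : (pvRoundA w).2.Nodup := by
  rw [roundA_snd]; exact (nodup_candList w).filter _

theorem sumB_eq (w : List (List Int)) (p : Nat × Nat) :
    pvSumB w p = pvSumA w p.1 p.2 := by
  unfold pvSumB pvNbrs pvSumA
  simp only [List.foldl_cons, List.foldl_nil]
  ring

theorem interior_iff (w : List (List Int)) (p : Nat × Nat) :
    pvInterior w p = true ↔ pvInt' w p := by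
  unfold pvInterior pvInt'
  simp

theorem nbr_symm (p q : Nat × Nat) (h1 : 1 ≤ p.1) (h2 : 1 ≤ p.2)
    (hq : q ∈ pvNbrs p) : p ∈ pvNbrs q := by
  obtain ⟨i, j⟩ := p
  obtain ⟨a, b⟩ := q
  have h1' : 1 ≤ i := h1
  have h2' : 1 ≤ j := h2
  simp only [pvNbrs, List.mem_cons, List.not_mem_nil, or_false, Prod.mk.injEq] at hq ⊢
  rcases hq with ⟨ha, hb⟩ | ⟨ha, hb⟩ | ⟨ha, hb⟩ | ⟨ha, hb⟩ | ⟨ha, hb⟩ | ⟨ha, hb⟩ | ⟨ha, hb⟩ | ⟨ha, hb⟩ <;>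
    subst ha <;> subst hb <;> omega

theorem rem_ext (a b : List (List Int)) (h : pvExt a b) (p : Nat × Nat) :
    pvRem a p ↔ pvRem b p := by
  obtain ⟨hlen, hrow, hg⟩ := h
  have hs : ∀ i j, pvSumA a i j = pvSumA b i j := by
    intro i j; unfold pvSumA; simp [hg]
  unfold pvRem pvInt'
  rw [hlen, hrow, hg, hs]

-- frontier lemma: a cell removable after this round's removals is a neighbour of a removed cell
theorem pvFrontier (w : List (List Int)) (rs : List (Nat × Nat))
    (hrs : ∀ r, r ∈ rs ↔ pvRem w r) (p : Nat × Nat)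
    (hp : pvRem (pvApply w rs) p) : ∃ q ∈ rs, p ∈ pvNbrs q := by
  obtain ⟨hpint, hpg, hps⟩ := hp
  have hnotin : p ∉ rs := by
    intro hin
    rw [pvG_apply] at hpg
    simp only [show ((p.1, p.2) : Nat × Nat) = p from rfl, if_pos hin] at hpg
    exact absurd hpg (by norm_num)
  have hgw : pvG w p.1 p.2 = 1 := by
    rw [pvG_apply] at hpg
    simpa [show ((p.1, p.2) : Nat × Nat) = p from rfl, hnotin] using hpg
  have hintw : pvInt' w p := by
    unfold pvInt' at hpint ⊢
    rwa [len_apply, rowlen_apply] at hpint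
  have hsw : ¬ (pvSumA w p.1 p.2 < 4) := by
    intro hlt
    exact hnotin ((hrs p).2 ⟨hintw, hgw, hlt⟩)
  by_contra hno
  push_neg at hno
  have hsame : ∀ a b : Nat, ((a, b) : Nat × Nat) ∈ pvNbrs p →
      pvG (pvApply w rs) a b = pvG w a b := by
    intro a b hab
    rw [pvG_apply, if_neg]
    intro hin
    exact hno (a, b) hin (nbr_symm p (a, b) hintw.1 hintw.2.2.1 hab)
  have heq : pvSumA (pvApply w rs) p.1 p.2 = pvSumA w p.1 p.2 := by
    unfold pvSumA
    rw [hsame _ _ (by simp [pvNbrs]), hsame _ _ (by simp [pvNbrs]),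
      hsame _ _ (by simp [pvNbrs]), hsame _ _ (by simp [pvNbrs]),
      hsame _ _ (by simp [pvNbrs]), hsame _ _ (by simp [pvNbrs]),
      hsame _ _ (by simp [pvNbrs]), hsame _ _ (by simp [pvNbrs])]
  rw [heq] at hps
  exact hsw hps

theorem loop_eq (fuel : Nat) (wA wB : List (List Int)) (cand : List (Nat × Nat)) (total : Int)
    (hExt : pvExt wA wB) (hnd : cand.Nodup)
    (hint : ∀ p ∈ cand, pvInt' wB p)
    (hcov : ∀ p, pvRem wB p → p ∈ cand) :
    pvLoopA fuel wA total = pvLoopB fuel wB cand total := by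
  induction fuel generalizing wA wB cand total with
  | zero => rfl
  | succ n ih =>
    have hremA : ∀ pp, pp ∈ (pvRoundA wA).2 ↔ pvRem wB pp :=
      fun pp => (mem_roundA wA pp).trans (rem_ext wA wB hExt pp)
    have hremB : ∀ pp, pp ∈ cand.filter (fun p => pvG wB p.1 p.2 == 1 && decide (pvSumB wB p < 4)) ↔ pvRem wB pp := by
      intro pp
      rw [List.mem_filter]
      constructor
      · rintro ⟨hc, hpred⟩
        simp only [Bool.and_eq_true, beq_iff_eq, decide_eq_true_eq] at hpred
        exact ⟨hint pp hc, hpred.1, by rw [← sumB_eq]; exact hpred.2⟩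
      · rintro ⟨hi, hg, hs⟩
        refine ⟨hcov pp ⟨hi, hg, hs⟩, ?_⟩
        simp only [Bool.and_eq_true, beq_iff_eq, decide_eq_true_eq]
        exact ⟨hg, by rw [sumB_eq]; exact hs⟩
    have hperm : (pvRoundA wA).2.Perm (cand.filter (fun p => pvG wB p.1 p.2 == 1 && decide (pvSumB wB p < 4))) :=
      (List.perm_ext_iff_of_nodup (nodup_roundA wA) (hnd.filter _)).2
        (fun pp => (hremA pp).trans (hremB pp).symm)
    have hlen := hperm.length_eq
    have stepA : pvLoopA (n+1) wA total =
        (if (pvRoundA wA).1 = 0 ∨ (pvRoundA wA).2.length = 0 then total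
         else pvLoopA n (pvApply wA (pvRoundA wA).2) (total + (pvRoundA wA).1)) := rfl
    have stepB : pvLoopB (n+1) wB cand total =
        (if cand.isEmpty then total
         else if (cand.filter (fun p => pvG wB p.1 p.2 == 1 && decide (pvSumB wB p < 4))).isEmpty then total
         else pvLoopB n (pvApply wB (cand.filter (fun p => pvG wB p.1 p.2 == 1 && decide (pvSumB wB p < 4))))
           (PySem.Set.ofList (((cand.filter (fun p => pvG wB p.1 p.2 == 1 && decide (pvSumB wB p < 4))).flatMap pvNbrs).filter
             (fun p => pvInterior (pvApply wB (cand.filter (fun p => pvG wB p.1 p.2 == 1 && decide (pvSumB wB p < 4)))) p)))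
           (total + ((cand.filter (fun p => pvG wB p.1 p.2 == 1 && decide (pvSumB wB p < 4))).length : Int))) := rfl
    rw [stepA, stepB]
    by_cases hc : cand.isEmpty
    · have hcand : cand = [] := List.isEmpty_iff.1 hc
      have hnil : (pvRoundA wA).2 = [] := by
        rw [List.eq_nil_iff_forall_not_mem]
        intro pp hpp
        have := hcov pp ((hremA pp).1 hpp)
        rw [hcand] at this
        exact absurd this (List.not_mem_nil)
      rw [if_pos hc, if_pos (Or.inr (by rw [hnil]; rfl))]
    · rw [if_neg hc]
      by_cases hr : (cand.filter (fun p => pvG wB p.1 p.2 == 1 && decide (pvSumB wB p < 4))).isEmpty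
      · have hfil : cand.filter (fun p => pvG wB p.1 p.2 == 1 && decide (pvSumB wB p < 4)) = [] :=
          List.isEmpty_iff.1 hr
        have hnil : (pvRoundA wA).2 = [] := by
          rw [List.eq_nil_iff_forall_not_mem]
          intro pp hpp
          have := (hremB pp).2 ((hremA pp).1 hpp)
          rw [hfil] at this
          exact absurd this (List.not_mem_nil)
        rw [if_pos hr, if_pos (Or.inr (by rw [hnil]; rfl))]
      · rw [if_neg hr]
        have hne : (pvRoundA wA).2.length ≠ 0 := by
          rw [hlen]
          intro h0
          exact hr (by rwa [List.isEmpty_iff, ← List.length_eq_zero_iff])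
        rw [if_neg (by
          rintro (h | h)
          · rw [roundA_fst] at h
            exact hne (by exact_mod_cast h)
          · exact hne h)]
        have hmemEq : ∀ pp : Nat × Nat, pp ∈ (pvRoundA wA).2 ↔
            pp ∈ cand.filter (fun p => pvG wB p.1 p.2 == 1 && decide (pvSumB wB p < 4)) :=
          fun pp => (hremA pp).trans (hremB pp).symm
        have hExt' : pvExt (pvApply wA (pvRoundA wA).2)
            (pvApply wB (cand.filter (fun p => pvG wB p.1 p.2 == 1 && decide (pvSumB wB p < 4)))) := by
          refine ⟨by rw [len_apply, len_apply, hExt.1],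
            fun i => by rw [rowlen_apply, rowlen_apply, hExt.2.1], ?_⟩
          intro i j
          rw [pvG_apply, pvG_apply, hExt.2.2]
          by_cases hm : ((i, j) : Nat × Nat) ∈ (pvRoundA wA).2
          · rw [if_pos hm, if_pos ((hmemEq _).1 hm)]
          · rw [if_neg hm, if_neg (fun hm2 => hm ((hmemEq _).2 hm2))]
        rw [ih _ _ _ _ hExt' (PySem.Set.nodup_ofList _) ?_ ?_, roundA_fst, hlen]
        · intro p hp
          have hmem := (PySem.Set.mem_ofList _ _).1 hp
          have hf := (List.mem_filter.1 hmem).2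
          exact (interior_iff _ p).1 hf
        · intro p hp
          apply (PySem.Set.mem_ofList _ _).2
          rw [List.mem_filter]
          obtain ⟨q, hq, hpn⟩ := pvFrontier wB _ (fun r => hremB r) p hp
          exact ⟨List.mem_flatMap.2 ⟨q, hq, hpn⟩, (interior_iff _ p).2 hp.1⟩

-- ===== VERDICT (by name: the statement is the Claim_ definition above) =====
theorem calculateAdjacencies_spec : Claim_equal_calculateAdjacencies := by
  intro w _ _
  unfold Spec_calculateAdjacencies calculateAdjacencies calculateAdjacencies_alt
  exact loop_eq (pvFuel w) w w (PySem.Set.ofList (pvCandList w)) 0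
    ⟨rfl, fun _ => rfl, fun _ _ => rfl⟩
    (PySem.Set.nodup_ofList _)
    (fun p hp => (mem_candList w p).1 ((PySem.Set.mem_ofList _ _).1 hp))
    (fun p hp => (PySem.Set.mem_ofList _ _).2 ((mem_candList w p).2 hp.1))
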